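-- pv_equiv track=rewrite | github.com/GioseaxMC/swami | swami.py | llvm_len
-- ===== SOURCE A (Python) =====
-- def llvm_len(s: str) -> int:
--     length = 0
--     i = 0
--     while i < len(s):
--         if s[i] == "\\" and i + 2 < len(s) and s[i+1] in "0123456789ABCDEFabcdef":
--             i += 3
--         else:
--             i += 1
--         length += 1
--     return length
-- ===== SOURCE B (Python) =====
-- import re
--
-- def llvm_len(s: str) -> int:
--     return len(re.findall(r'\\[0-9A-Fa-f].|.', s, re.DOTALL))
-- ===== Notes on version B (the rewrite author's own statement) =====
-- stated objective: idiomatic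
-- what changed: Replaces the hand-rolled index-walking while loop with a single regex tokenization: len(re.findall(r'\\[0-9A-Fa-f].|.', s, re.DOTALL)) counts escape tokens and single characters in one library call.
import Mathlib
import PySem

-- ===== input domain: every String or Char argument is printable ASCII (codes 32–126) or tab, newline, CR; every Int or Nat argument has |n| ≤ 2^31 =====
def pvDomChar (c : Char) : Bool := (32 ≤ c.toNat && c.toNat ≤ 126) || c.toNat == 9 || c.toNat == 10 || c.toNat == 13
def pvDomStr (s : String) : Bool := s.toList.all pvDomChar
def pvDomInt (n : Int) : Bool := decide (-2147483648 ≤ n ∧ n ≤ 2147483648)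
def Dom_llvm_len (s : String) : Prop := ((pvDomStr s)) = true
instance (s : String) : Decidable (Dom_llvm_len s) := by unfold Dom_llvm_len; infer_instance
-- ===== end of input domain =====

-- B replaces A's manual index-walking loop by a regex tokenization (one re.findall); the Lean
-- port of B transcribes that regex's tokenizer: leftmost match of `\\[0-9A-Fa-f].` else `.` (DOTALL).

-- ===== PORT A =====
-- A's while loop over index i; the nested ifs transcribe Python's short-circuit
-- `s[i] == "\\" and i + 2 < len(s) and s[i+1] in "0123456789ABCDEFabcdef"`.
def llvmGoA (cs : List Char) (i : Nat) (length : Int) : Int :=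
  if h : i < cs.length then
    if cs[i] = '\\' then
      if h2 : i + 2 < cs.length then
        if ("0123456789ABCDEFabcdef".toList).contains (cs[i+1]'(by omega)) then
          llvmGoA cs (i + 3) (length + 1)
        else
          llvmGoA cs (i + 1) (length + 1)
      else
        llvmGoA cs (i + 1) (length + 1)
    else
      llvmGoA cs (i + 1) (length + 1)
  else
    length
termination_by cs.length - i

def llvm_len (s : String) : Int := llvmGoA s.toList 0 0

-- ===== PORT B =====
-- the character class [0-9A-Fa-f] of B's regex
def llvmHexB (c : Char) : Bool := ('0' ≤ c && c ≤ '9') || ('A' ≤ c && c ≤ 'F') || ('a' ≤ c && c ≤ 'f')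

-- exact transcription of re.findall(r'\\[0-9A-Fa-f].|.', s, re.DOTALL): at each position the
-- first alternative (backslash, hex digit, any char) is tried, else one char; the count of
-- matches is len(findall).
def llvmTokB : List Char → Int
  | [] => 0
  | '\\' :: d :: e :: rest' =>
    if llvmHexB d then 1 + llvmTokB rest' else 1 + llvmTokB (d :: e :: rest')
  | _ :: rest => 1 + llvmTokB rest

def llvm_len_alt (s : String) : Int := llvmTokB s.toList

-- ===== PRECONDITION & SPEC =====
def Spec_llvm_len (s : String) (out : Int) : Prop := out = llvm_len_alt s
instance (s : String) (out : Int) : Decidable (Spec_llvm_len s out) := by unfold Spec_llvm_len; infer_instance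

-- ===== CLAIM (what is proved, stated in full; the proofs are below) =====
def Claim_equal_llvm_len : Prop := ∀ (s : String), Dom_llvm_len s → Spec_llvm_len s (llvm_len s)

-- ===== LEMMAS AND PROOFS =====
set_option maxRecDepth 4000 in
theorem llvm_hex_eq (c : Char) :
    ("0123456789ABCDEFabcdef".toList).contains c = llvmHexB c := by
  have h1 : ("0123456789ABCDEFabcdef".toList) =
      ['0','1','2','3','4','5','6','7','8','9','A','B','C','D','E','F','a','b','c','d','e','f'] := by
    decide
  rw [llvmHexB, h1]
  simp only [List.contains_cons, List.contains_nil, Bool.or_false]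
  rw [Bool.eq_iff_iff]
  simp [Char.ext_iff, Char.le_def, UInt32.le_iff_toNat_le, UInt32.ext_iff]
  omega

theorem llvmTokB_nil : llvmTokB [] = 0 := rfl

theorem llvmTokB_esc (d e : Char) (r : List Char) :
    llvmTokB ('\\' :: d :: e :: r) =
      if llvmHexB d then 1 + llvmTokB r else 1 + llvmTokB (d :: e :: r) := rfl

theorem llvmTokB_bs_nil : llvmTokB ['\\'] = 1 + llvmTokB [] := rfl

theorem llvmTokB_bs_one (x : Char) : llvmTokB ['\\', x] = 1 + llvmTokB [x] := rfl

theorem llvmTokB_cons_not_backslash {c : Char} (rest : List Char) (h : ¬ c = '\\') :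
    llvmTokB (c :: rest) = 1 + llvmTokB rest := by
  rw [llvmTokB.eq_def]
  split
  · simp_all
  · simp_all
  · rename_i a b r hnot heq
    cases heq
    rfl

theorem llvmGoA_eq_tok (cs : List Char) :
    ∀ (n i : Nat) (length : Int), cs.length - i ≤ n →
      llvmGoA cs i length = length + llvmTokB (cs.drop i) := by
  intro n
  induction n with
  | zero =>
    intro i length hle
    have hge : cs.length ≤ i := by omega
    rw [llvmGoA]
    simp [Nat.not_lt.mpr hge, List.drop_eq_nil_of_le hge, llvmTokB_nil]
  | succ n ih =>
    intro i length hle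
    rw [llvmGoA]
    by_cases h : i < cs.length
    · have hdrop : cs.drop i = cs[i] :: cs.drop (i + 1) := List.drop_eq_getElem_cons h
      simp only [h, dif_pos]
      by_cases hb : cs[i] = '\\'
      · simp only [hb, if_pos]
        by_cases h2 : i + 2 < cs.length
        · have hdrop1 : cs.drop (i + 1) = cs[i+1] :: cs.drop (i + 2) :=
            List.drop_eq_getElem_cons (by omega)
          have hdrop2 : cs.drop (i + 2) = cs[i+2] :: cs.drop (i + 3) :=
            List.drop_eq_getElem_cons (by omega)
          simp only [h2, dif_pos]
          by_cases hhex : ("0123456789ABCDEFabcdef".toList).contains cs[i+1]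
          · rw [if_pos hhex, ih (i + 3) (length + 1) (by omega)]
            rw [hdrop, hb, hdrop1, hdrop2, llvmTokB_esc]
            have hx : llvmHexB cs[i+1] = true := by rw [← llvm_hex_eq]; exact hhex
            rw [if_pos hx]
            omega
          · rw [if_neg hhex, ih (i + 1) (length + 1) (by omega)]
            have hx : llvmHexB cs[i+1] = false := by rw [← llvm_hex_eq]; simpa using hhex
            rw [hdrop1, hdrop2, hdrop, hb, hdrop1, hdrop2, llvmTokB_esc, hx]
            simp only [Bool.false_eq_true, if_false]
            omega
        · -- fewer than two characters after the backslash: the single-char alternative matches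
          simp only [h2, dif_neg, not_false_iff]
          rw [ih (i + 1) (length + 1) (by omega), hdrop, hb]
          have hcases : cs.drop (i + 1) = [] ∨ ∃ x, cs.drop (i + 1) = [x] := by
            have hl : (cs.drop (i + 1)).length ≤ 1 := by
              simp [List.length_drop]; omega
            match hd : cs.drop (i + 1) with
            | [] => exact Or.inl rfl
            | [x] => exact Or.inr ⟨x, rfl⟩
            | x :: y :: t => rw [hd] at hl; simp at hl
          rcases hcases with hd | ⟨x, hd⟩ <;> rw [hd]
          · rw [llvmTokB_bs_nil]; omega
          · rw [llvmTokB_bs_one]; omega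
      · rw [if_neg hb, ih (i + 1) (length + 1) (by omega), hdrop,
          llvmTokB_cons_not_backslash _ hb]
        omega
    · have hge : cs.length ≤ i := by omega
      simp [h, List.drop_eq_nil_of_le hge, llvmTokB_nil]

-- ===== VERDICT (by name: the statement is the Claim_ definition above) =====
theorem llvm_len_spec : Claim_equal_llvm_len := by
  intro s _
  unfold Spec_llvm_len llvm_len llvm_len_alt
  rw [llvmGoA_eq_tok s.toList s.toList.length 0 0 (by omega)]
  simp
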